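-- pv_equiv track=rewrite | github.com/need-singularity/n6-architecture | docs/energy-efficiency/verify_n6.py | jordan2
-- ===== SOURCE A (Python) =====
-- def jordan2(n):
--     r=n*n; m=n; p=2
--     while p*p<=m:
--         if m%p==0:
--             r=r*(p*p-1)//(p*p)
--             while m%p==0: m//=p
--         p+=1
--     if m>1: r=r*(m*m-1)//(m*m)
--     return r
-- ===== SOURCE B (Python) =====
-- def jordan2(n):
--     # Collect the distinct prime factors of n by trial division.
--     primes = []
--     m = n
--     p = 2
--     while p * p <= m:
--         if m % p == 0:
--             primes.append(p)
--             while m % p == 0: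
--                 m //= p
--         p += 1
--     if m > 1:
--         primes.append(m)
--     # Inclusion-exclusion (Moebius) form of J_2:
--     # sum over squarefree divisors d of rad(n) of mu(d) * (n//d)**2.
--     terms = [(1, 1)]  # (sign, divisor) for each subset of the distinct primes
--     for q in primes:
--         terms = terms + [(-s, d * q) for (s, d) in terms]
--     return sum(s * (n // d) ** 2 for (s, d) in terms)
-- ===== Notes on version B (the rewrite author's own statement) =====
-- stated objective: alternative
-- what changed: B computes J_2(n) by inclusion-exclusion over subsets of the distinct prime factors (sum over squarefree divisors d of mu(d)*(n//d)**2) instead of A's incremental r = r*(p*p-1)//(p*p) updates during factorization.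
import Mathlib
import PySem

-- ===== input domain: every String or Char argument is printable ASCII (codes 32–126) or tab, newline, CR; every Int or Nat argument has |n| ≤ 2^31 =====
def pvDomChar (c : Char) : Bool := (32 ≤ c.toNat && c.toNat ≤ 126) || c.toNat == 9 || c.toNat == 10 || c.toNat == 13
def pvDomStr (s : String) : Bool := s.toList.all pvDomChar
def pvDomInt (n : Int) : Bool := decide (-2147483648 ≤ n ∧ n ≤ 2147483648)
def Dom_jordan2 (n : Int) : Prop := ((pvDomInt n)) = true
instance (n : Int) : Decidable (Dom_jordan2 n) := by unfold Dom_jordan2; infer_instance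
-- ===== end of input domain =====

-- B computes J_2(n) by inclusion-exclusion over subsets of the distinct prime factors
-- instead of A's incremental r = r*(p^2-1)//p^2 updates (objective: alternative algorithm).

-- arithmetic fact cited by stripF's termination proof (and reused below)
theorem pv_ediv_lt_self (m p : Int) (hm : 0 < m) (hp : 1 < p) : m / p < m := by
  have h0 := Int.mul_ediv_add_emod m p
  have h1 : 0 ≤ m % p := Int.emod_nonneg m (by omega)
  have h2 : 0 ≤ m / p := Int.ediv_nonneg (le_of_lt hm) (by omega)
  have h3 : 2 * (m / p) ≤ p * (m / p) := by nlinarith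
  omega

-- ===== PORT A =====
-- inner loop 'while m % p == 0: m //= p', shared verbatim by both Python versions.
-- The conjuncts '1 < p' and '0 < m' in the guard only make the recursion total;
-- every call site has 2 ≤ p and 0 < m, where they hold throughout Python's loop.
def stripF (p m : Int) : Int :=
  if h : 1 < p ∧ 0 < m ∧ PySem.Int.mod m p = 0 then stripF p (PySem.Int.floordiv m p) else m
termination_by m.toNat
decreasing_by
  obtain ⟨hp, hm, _⟩ := h
  rw [PySem.Int.floordiv_eq_ediv_of_pos (by omega)]
  have h1 : m / p < m := pv_ediv_lt_self m p hm hp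
  have h2 : 0 ≤ m / p := Int.ediv_nonneg (le_of_lt hm) (by omega)
  omega

-- helper lemma cited by the outer loops' decreasing_by
theorem stripF_le_aux (p : Int) : ∀ (k : Nat) (m : Int), m.toNat ≤ k → 0 ≤ m → stripF p m ≤ m := by
  intro k
  induction k with
  | zero =>
    intro m hk hm
    rw [stripF]
    split
    · omega
    · exact le_refl m
  | succ k ih =>
    intro m hk hm
    rw [stripF]
    split
    case isFalse => exact le_refl m
    case isTrue h =>
      obtain ⟨hp, hm0, _⟩ := h
      rw [PySem.Int.floordiv_eq_ediv_of_pos (by omega : (0:Int) < p)]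
      have h1 : m / p < m := pv_ediv_lt_self m p hm0 hp
      have h2 : 0 ≤ m / p := Int.ediv_nonneg hm (by omega)
      exact le_trans (ih (m / p) (by omega) h2) (le_of_lt h1)

theorem stripF_le (p m : Int) (hm : 0 ≤ m) : stripF p m ≤ m :=
  stripF_le_aux p m.toNat m le_rfl hm

-- outer loop of A; '2 ≤ p' in the guard is a totality guard (p starts at 2 and only grows)
def loopA (r m p : Int) : Int × Int :=
  if h : 2 ≤ p ∧ p * p ≤ m then
    if PySem.Int.mod m p = 0 then
      loopA (PySem.Int.floordiv (r * (p * p - 1)) (p * p)) (stripF p m) (p + 1)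
    else
      loopA r m (p + 1)
  else (r, m)
termination_by (m - p).toNat
decreasing_by
  · obtain ⟨hp, hpm⟩ := h
    have h2p : 2 * p ≤ p * p := by nlinarith
    have hle : stripF p m ≤ m := stripF_le p m (by omega)
    omega
  · obtain ⟨hp, hpm⟩ := h
    have h2p : 2 * p ≤ p * p := by nlinarith
    omega

def jordan2 (n : Int) : Int :=
  let rm := loopA (n * n) n 2
  if 1 < rm.2 then PySem.Int.floordiv (rm.1 * (rm.2 * rm.2 - 1)) (rm.2 * rm.2) else rm.1

-- ===== PORT B =====
-- B's factorization loop: collects the distinct prime factors instead of updating r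
def loopB (primes : List Int) (m p : Int) : List Int × Int :=
  if h : 2 ≤ p ∧ p * p ≤ m then
    if PySem.Int.mod m p = 0 then
      loopB (primes ++ [p]) (stripF p m) (p + 1)
    else
      loopB primes m (p + 1)
  else (primes, m)
termination_by (m - p).toNat
decreasing_by
  · obtain ⟨hp, hpm⟩ := h
    have h2p : 2 * p ≤ p * p := by nlinarith
    have hle : stripF p m ≤ m := stripF_le p m (by omega)
    omega
  · obtain ⟨hp, hpm⟩ := h
    have h2p : 2 * p ≤ p * p := by nlinarith
    omega

-- 'terms = terms + [(-s, d * q) for (s, d) in terms]'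
def expandTerms (ts : List (Int × Int)) (q : Int) : List (Int × Int) :=
  ts ++ ts.map (fun sd => (-sd.1, sd.2 * q))

def jordan2_alt (n : Int) : Int :=
  let pm := loopB [] n 2
  let primes := if 1 < pm.2 then pm.1 ++ [pm.2] else pm.1
  let terms := primes.foldl expandTerms [(1, 1)]
  (terms.map (fun sd => sd.1 * (PySem.Int.floordiv n sd.2) ^ 2)).sum

-- ===== PRECONDITION & SPEC =====
def Spec_jordan2 (n : Int) (out : Int) : Prop := out = jordan2_alt n
instance (n : Int) (out : Int) : Decidable (Spec_jordan2 n out) := by unfold Spec_jordan2; infer_instance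

-- ===== CLAIM (what is proved, stated in full; the proofs are below) =====
def Claim_equal_jordan2 : Prop := ∀ (n : Int), Dom_jordan2 n → Spec_jordan2 n (jordan2 n)

-- ===== LEMMAS AND PROOFS =====

-- proof-only abbreviations for the two tails and B's accumulated state
def sumVal (n : Int) (ts : List (Int × Int)) : Int :=
  (ts.map (fun sd => sd.1 * (PySem.Int.floordiv n sd.2) ^ 2)).sum

def termsOf (ps : List Int) : List (Int × Int) := ps.foldl expandTerms [(1, 1)]

def finishA (rm : Int × Int) : Int :=
  if 1 < rm.2 then PySem.Int.floordiv (rm.1 * (rm.2 * rm.2 - 1)) (rm.2 * rm.2) else rm.1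

def finishB (n : Int) (pm : List Int × Int) : Int :=
  sumVal n (termsOf (if 1 < pm.2 then pm.1 ++ [pm.2] else pm.1))

theorem stripF_mul_dvd_aux (p : Int) :
    ∀ (k : Nat) (m : Int), m.toNat ≤ k → 1 < p → 0 < m → p ∣ m → p * stripF p m ∣ m := by
  intro k
  induction k with
  | zero => intro m hk _ hm _; omega
  | succ k ih =>
    intro m hk hp hm hpd
    rw [stripF, dif_pos ⟨hp, hm, (PySem.Int.mod_eq_zero_iff_dvd m p).2 hpd⟩,
        PySem.Int.floordiv_eq_ediv_of_pos (by omega : (0:Int) < p)]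
    have hlt : m / p < m := pv_ediv_lt_self m p hm hp
    have hq0 : 0 ≤ m / p := Int.ediv_nonneg (le_of_lt hm) (by omega)
    have hqm : m / p ∣ m := ⟨p, (Int.ediv_mul_cancel hpd).symm⟩
    by_cases h2 : p ∣ m / p
    · have hq_pos : 0 < m / p := by
        rcases h2 with ⟨c, hc⟩
        by_contra hle
        have : m / p = 0 := by omega
        rw [this] at hqm
        rcases hqm with ⟨c', hc'⟩
        omega
      exact dvd_trans (ih (m / p) (by omega) hp hq_pos h2) hqm
    · have hstop : stripF p (m / p) = m / p := by
        rw [stripF, dif_neg]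
        rintro ⟨_, _, hmod2⟩
        exact h2 ((PySem.Int.mod_eq_zero_iff_dvd _ _).1 hmod2)
      rw [hstop, Int.mul_ediv_cancel' hpd]

theorem stripF_mul_dvd (p m : Int) (hp : 1 < p) (hm : 0 < m) (hpd : p ∣ m) :
    p * stripF p m ∣ m :=
  stripF_mul_dvd_aux p m.toNat m le_rfl hp hm hpd

-- one inclusion-exclusion term gains exactly the factor (q^2-1)/q^2
theorem term_step (n q s d : Int) (hd : 0 < d) (hq : 2 ≤ q) (hdvd : d * q ∣ n) :
    (s * (PySem.Int.floordiv n d) ^ 2 + -s * (PySem.Int.floordiv n (d * q)) ^ 2) * (q * q)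
      = s * (PySem.Int.floordiv n d) ^ 2 * (q * q - 1) := by
  obtain ⟨k, hk⟩ := hdvd
  subst hk
  rw [PySem.Int.floordiv_eq_ediv_of_pos hd,
      PySem.Int.floordiv_eq_ediv_of_pos (by nlinarith : (0:Int) < d * q),
      Int.mul_ediv_cancel_left k (by nlinarith : d * q ≠ 0)]
  have hdq : d * q * k / d = q * k := by
    rw [mul_assoc, Int.mul_ediv_cancel_left _ (by omega : d ≠ 0)]
  rw [hdq]
  ring

theorem sumVal_expand_mul (n q : Int) (hq : 2 ≤ q) :
    ∀ ts : List (Int × Int), (∀ sd ∈ ts, 0 < sd.2 ∧ sd.2 * q ∣ n) →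
    sumVal n (expandTerms ts q) * (q * q) = sumVal n ts * (q * q - 1) := by
  intro ts
  induction ts with
  | nil => intro _; simp [sumVal, expandTerms]
  | cons sd ts ih =>
    intro h
    obtain ⟨hd, hdvd⟩ := h sd (List.mem_cons_self ..)
    have hih := ih (fun x hx => h x (List.mem_cons_of_mem _ hx))
    simp only [sumVal, expandTerms, List.map_append, List.map_cons, List.sum_append,
      List.sum_cons] at hih ⊢
    linear_combination term_step n q sd.1 sd.2 hd hq hdvd + hih

theorem sumVal_expand (n q : Int) (ts : List (Int × Int)) (hq : 2 ≤ q)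
    (h : ∀ sd ∈ ts, 0 < sd.2 ∧ sd.2 * q ∣ n) :
    sumVal n (expandTerms ts q) = PySem.Int.floordiv (sumVal n ts * (q * q - 1)) (q * q) := by
  have hmul := sumVal_expand_mul n q hq ts h
  rw [← hmul, PySem.Int.floordiv_eq_ediv_of_pos (by nlinarith : (0:Int) < q * q),
      Int.mul_ediv_cancel _ (by nlinarith : (q * q : Int) ≠ 0)]

theorem termsOf_append (ps : List Int) (q : Int) :
    termsOf (ps ++ [q]) = expandTerms (termsOf ps) q := by
  simp [termsOf, List.foldl_append]

theorem inv_expand (D q : Int) (ts : List (Int × Int))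
    (h : ∀ sd ∈ ts, 0 < sd.2 ∧ sd.2 ∣ D) (hq : 0 < q) :
    ∀ sd ∈ expandTerms ts q, 0 < sd.2 ∧ sd.2 ∣ D * q := by
  intro sd hsd
  simp only [expandTerms, List.mem_append] at hsd
  rcases hsd with h1 | h1
  · exact ⟨(h sd h1).1, dvd_mul_of_dvd_left (h sd h1).2 q⟩
  · obtain ⟨x, hx, rfl⟩ := List.mem_map.1 h1
    exact ⟨mul_pos (h x hx).1 hq, mul_dvd_mul (h x hx).2 dvd_rfl⟩

-- after both loops have stopped (same m), A's leftover-prime step equals B's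
theorem final_eq (n r m : Int) (ps : List Int)
    (hinv : ∀ sd ∈ termsOf ps, 0 < sd.2 ∧ sd.2 ∣ ps.prod)
    (hdvd : ps.prod * m ∣ n) (hr : r = sumVal n (termsOf ps)) :
    finishA (r, m) = finishB n (ps, m) := by
  unfold finishA finishB
  by_cases hm : 1 < m
  · simp only [hm, if_true]
    rw [termsOf_append, sumVal_expand n m (termsOf ps) (by omega)
      (fun sd hsd => ⟨(hinv sd hsd).1,
        dvd_trans (mul_dvd_mul_right (hinv sd hsd).2 m) hdvd⟩), hr]
  · simp [hm, hr]

-- lockstep invariant: A's running r is always the inclusion-exclusion sum of B's terms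
theorem lockstep (n : Int) : ∀ (K : Nat) (m p r : Int) (ps : List Int),
    (m - p).toNat ≤ K → 2 ≤ p →
    (∀ sd ∈ termsOf ps, 0 < sd.2 ∧ sd.2 ∣ ps.prod) →
    ps.prod * m ∣ n → r = sumVal n (termsOf ps) →
    finishA (loopA r m p) = finishB n (loopB ps m p) := by
  intro K
  induction K with
  | zero =>
    intro m p r ps hK hp hinv hdvd hr
    rw [loopA, loopB]
    have hguard : ¬ (2 ≤ p ∧ p * p ≤ m) := by
      rintro ⟨h1, h2⟩
      have : 2 * p ≤ p * p := by nlinarith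
      omega
    rw [dif_neg hguard, dif_neg hguard]
    exact final_eq n r m ps hinv hdvd hr
  | succ K ih =>
    intro m p r ps hK hp hinv hdvd hr
    rw [loopA, loopB]
    by_cases hguard : 2 ≤ p ∧ p * p ≤ m
    case neg =>
      rw [dif_neg hguard, dif_neg hguard]
      exact final_eq n r m ps hinv hdvd hr
    case pos =>
      rw [dif_pos hguard, dif_pos hguard]
      obtain ⟨_, hpm⟩ := hguard
      have h2p : 2 * p ≤ p * p := by nlinarith
      have hm0 : 0 < m := by omega
      by_cases hmod : PySem.Int.mod m p = 0
      · rw [if_pos hmod, if_pos hmod]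
        have hpdvd : p ∣ m := (PySem.Int.mod_eq_zero_iff_dvd m p).1 hmod
        have hstrip_le := stripF_le p m (by omega)
        have hsm := stripF_mul_dvd p m (by omega) hm0 hpdvd
        have hprod : (ps ++ [p]).prod = ps.prod * p := by simp
        have hterm : ∀ sd ∈ termsOf ps, 0 < sd.2 ∧ sd.2 * p ∣ n := fun sd hsd =>
          ⟨(hinv sd hsd).1,
            dvd_trans (dvd_trans (mul_dvd_mul (hinv sd hsd).2 hpdvd)
              (dvd_of_eq rfl)) (dvd_trans (dvd_refl _) (dvd_trans
                (mul_dvd_mul_left ps.prod (dvd_refl m)) hdvd))⟩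
        refine ih (stripF p m) (p + 1) _ (ps ++ [p]) (by omega) (by omega) ?_ ?_ ?_
        · rw [termsOf_append, hprod]
          exact inv_expand ps.prod p (termsOf ps) hinv (by omega)
        · rw [hprod]
          calc ps.prod * p * stripF p m = ps.prod * (p * stripF p m) := by ring
            _ ∣ ps.prod * m := mul_dvd_mul_left _ hsm
            _ ∣ n := hdvd
        · rw [termsOf_append, sumVal_expand n p (termsOf ps) (by omega) hterm, hr]
      · rw [if_neg hmod, if_neg hmod]
        exact ih m (p + 1) r ps (by omega) (by omega) hinv hdvd hr

-- ===== VERDICT (by name: the statement is the Claim_ definition above) =====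
theorem jordan2_spec : Claim_equal_jordan2 := by
  intro n _
  unfold Spec_jordan2
  rw [show jordan2 n = finishA (loopA (n * n) n 2) from rfl,
      show jordan2_alt n = finishB n (loopB [] n 2) from rfl]
  refine lockstep n (n - 2).toNat n 2 (n * n) [] le_rfl le_rfl ?_ (by simp) ?_
  · intro sd hsd
    simp only [termsOf, List.foldl_nil, List.mem_singleton] at hsd
    subst hsd
    simp
  · simp only [sumVal, termsOf, List.foldl_nil, List.map_cons, List.map_nil, List.sum_cons,
      List.sum_nil]
    rw [PySem.Int.floordiv_eq_ediv_of_pos Int.one_pos, Int.ediv_one]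
    ring
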